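-- pv_equiv track=rewrite | github.com/monkey1sai/graphrag_saas | graphrag_saas/backend/graphrag_platform/hierarchy.py | build
-- ===== SOURCE A (Python) =====
-- from typing import Dict, List, Tuple
--
-- def build(entities: Dict[int, str]) -> Dict[int, Dict[int, List[int]]]:
--     level0: Dict[int, List[int]] = {eid: [eid] for eid in entities}
--     prefix_groups: Dict[str, List[int]] = {}
--     for eid, name in entities.items():
--         first_char = name[0].lower() if name else "#"
--         prefix_groups.setdefault(first_char, []).append(eid)
--     level1: Dict[int, List[int]] = {}
--     for idx, (prefix, members) in enumerate(sorted(prefix_groups.items())):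
--         level1[idx] = members
--     second_groups: Dict[str, List[int]] = {}
--     for cid, members in level1.items():
--         if members:
--             name = entities[members[0]]
--             key = name[1].lower() if len(name) > 1 else "#"
--         else:
--             key = "#"
--         second_groups.setdefault(key, []).append(cid)
--     level2: Dict[int, List[int]] = {}
--     for idx, (key, members) in enumerate(sorted(second_groups.items())):
--         level2[idx] = members
--     return {0: level0, 1: level1, 2: level2}
-- ===== SOURCE B (Python) =====
-- from typing import Dict, List, Tuple
--
-- def build(entities: Dict[int, str]) -> Dict[int, Dict[int, List[int]]]:
--     level0 = {eid: [eid] for eid in entities}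
--
--     def _runs(pairs):
--         # pairs come key-sorted; group maximal runs of equal keys
--         groups = []
--         cur = None
--         prev = None
--         for k, v in pairs:
--             if cur is not None and k == prev:
--                 cur.append(v)
--             else:
--                 if cur is not None:
--                     groups.append(cur)
--                 cur = [v]
--             prev = k
--         if cur is not None:
--             groups.append(cur)
--         return groups
--
--     def second_key(members):
--         if members:
--             name = entities[members[0]]
--             return name[1].lower() if len(name) > 1 else "#"
--         return "#"
--
--     pairs1 = sorted(((name[0].lower() if name else "#", eid)
--                      for eid, name in entities.items()), key=lambda p: p[0])
--     level1 = dict(enumerate(_runs(pairs1)))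
--
--     pairs2 = sorted(((second_key(members), cid)
--                      for cid, members in level1.items()), key=lambda p: p[0])
--     level2 = dict(enumerate(_runs(pairs2)))
--
--     return {0: level0, 1: level1, 2: level2}
-- ===== Notes on version B (the rewrite author's own statement) =====
-- stated objective: alternative
-- what changed: A buckets entities into an insertion-ordered dict of key->members lists and then sorts the (key, members) items at each of the two levels; B instead stably sorts the (key, id) pairs of each level once and builds the groups in a single adjacent-run scan over the sorted list, so no grouping dict is ever built.
import Mathlib
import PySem

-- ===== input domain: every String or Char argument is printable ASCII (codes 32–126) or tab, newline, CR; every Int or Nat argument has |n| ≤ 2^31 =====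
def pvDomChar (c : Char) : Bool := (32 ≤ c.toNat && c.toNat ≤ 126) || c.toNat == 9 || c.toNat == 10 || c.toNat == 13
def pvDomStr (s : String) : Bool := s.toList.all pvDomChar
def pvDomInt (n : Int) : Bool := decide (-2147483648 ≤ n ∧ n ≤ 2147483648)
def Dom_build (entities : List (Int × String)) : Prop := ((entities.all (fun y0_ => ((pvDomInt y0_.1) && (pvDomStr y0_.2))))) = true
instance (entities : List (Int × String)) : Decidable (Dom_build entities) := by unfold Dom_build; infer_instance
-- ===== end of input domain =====

-- B replaces A's two bucket-dict-then-sort passes by a stable-sort-then-group-adjacent-runs pass per level (objective: alternative, similar cost).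

-- ===== PORT A =====
def pvFirstKey (s : String) : Char :=
  match s.toList with
  | [] => '#'
  | c :: _ => PySem.Chars.lowerChar c

def pvSecondKey (s : String) : Char :=
  match s.toList with
  | _ :: c :: _ => PySem.Chars.lowerChar c
  | _ => '#'

def pvSecondKeyOf (entities : List (Int × String)) (members : List Int) : Char :=
  match members with
  | m0 :: _ => pvSecondKey (PySem.Dict.getD (PySem.Dict.mk entities) m0 "")
  | [] => '#'

-- sorted(....items()) compares (key, members) tuples; dict keys are distinct, so sorting by the key alone is exact.
def build (entities : List (Int × String)) : List (Int × List (Int × List Int)) :=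
  let level0 : List (Int × List Int) := entities.map (fun p => (p.1, [p.1]))
  let prefix_groups : PySem.Dict Char (List Int) :=
    entities.foldl (fun d p => d.modify (pvFirstKey p.2) [] (fun l => l ++ [p.1])) PySem.Dict.empty
  let level1 : List (Int × List Int) :=
    (PySem.List.enumerate (PySem.List.sorted prefix_groups.items (fun kv => kv.1) false) 0).map
      (fun ip => (ip.1, ip.2.2))
  let second_groups : PySem.Dict Char (List Int) :=
    level1.foldl (fun d cm => d.modify (pvSecondKeyOf entities cm.2) [] (fun l => l ++ [cm.1]))
      PySem.Dict.empty
  let level2 : List (Int × List Int) :=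
    (PySem.List.enumerate (PySem.List.sorted second_groups.items (fun kv => kv.1) false) 0).map
      (fun ip => (ip.1, ip.2.2))
  [(0, level0), (1, level1), (2, level2)]

-- ===== PORT B =====
-- the body of _runs' loop in Source B: state = (finished groups, current run as (prev key, members)); pvRunsFlush is the final 'if cur is not None: groups.append(cur)'
def pvRunsStep (st : List (List Int) × Option (Char × List Int)) (kv : Char × Int) :
    List (List Int) × Option (Char × List Int) :=
  match st.2 with
  | some (p, cur) =>
    if kv.1 = p then (st.1, some (p, cur ++ [kv.2]))
    else (st.1 ++ [cur], some (kv.1, [kv.2]))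
  | none => (st.1, some (kv.1, [kv.2]))

def pvRunsFlush (st : List (List Int) × Option (Char × List Int)) : List (List Int) :=
  match st.2 with
  | none => st.1
  | some (_, cur) => st.1 ++ [cur]

def pvRuns (pairs : List (Char × Int)) : List (List Int) :=
  pvRunsFlush (pairs.foldl pvRunsStep (([] : List (List Int)), none))

def build_alt (entities : List (Int × String)) : List (Int × List (Int × List Int)) :=
  let level0 : List (Int × List Int) := entities.map (fun p => (p.1, [p.1]))
  let pairs1 := PySem.List.sorted (entities.map (fun p => (pvFirstKey p.2, p.1))) (fun q => q.1) false
  let level1 : List (Int × List Int) :=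
    (PySem.List.enumerate (pvRuns pairs1) 0).map (fun ig => (ig.1, ig.2))
  let pairs2 := PySem.List.sorted (level1.map (fun cm => (pvSecondKeyOf entities cm.2, cm.1)))
    (fun q => q.1) false
  let level2 : List (Int × List Int) :=
    (PySem.List.enumerate (pvRuns pairs2) 0).map (fun ig => (ig.1, ig.2))
  [(0, level0), (1, level1), (2, level2)]

-- ===== PRECONDITION & SPEC =====
def Spec_build (entities : List (Int × String)) (out : List (Int × List (Int × List Int))) : Prop := out = build_alt entities
instance (entities : List (Int × String)) (out : List (Int × List (Int × List Int))) : Decidable (Spec_build entities out) := by unfold Spec_build; infer_instance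

-- ===== CLAIM (what is proved, stated in full; the proofs are below) =====
def Claim_equal_build : Prop := ∀ (entities : List (Int × String)), Dom_build entities → Spec_build entities (build entities)

-- ===== LEMMAS AND PROOFS =====

-- my insertBy lemma
theorem insertBy_mid (before : Char × Int → Char × Int → Bool) (x : Char × Int)
    (A B : List (Char × Int)) (hA : ∀ y ∈ A, before x y = false)
    (hB : ∀ y ∈ B, before x y = true) :
    PySem.List.insertBy before x (A ++ B) = A ++ x :: B := by
  induction A with
  | nil =>
    cases B with
    | nil => simp [PySem.List.insertBy]
    | cons b bs => simp [PySem.List.insertBy, hB b (by simp)]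
  | cons a as ih =>
    have := hA a (by simp)
    simp [PySem.List.insertBy, this, ih (fun y hy => hA y (by simp [hy]))]

theorem sorted_lt_split (K : List Char) (c : Char) (hp : K.Pairwise (· < ·)) :
    K = K.filter (fun d => decide (d < c)) ++ (if c ∈ K then [c] else []) ++
        K.filter (fun d => decide (c < d)) := by
  induction K with
  | nil => simp
  | cons k K' ih =>
    rcases List.pairwise_cons.mp hp with ⟨hk, hp'⟩
    rcases lt_trichotomy k c with h | h | h
    · have hne : c ≠ k := ne_of_gt h
      simp only [List.filter_cons, h, decide_true, not_lt_of_gt h, decide_false,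
        List.mem_cons, hne, false_or]
      simpa [h, not_lt.mpr h.le] using congrArg (k :: ·) (ih hp')
    · subst h
      have h1 : K'.filter (fun d => decide (d < k)) = [] :=
        List.filter_eq_nil_iff.mpr (fun d hd => by simp [not_lt.mpr (hk d hd).le])
      have h2 : K'.filter (fun d => decide (k < d)) = K' :=
        List.filter_eq_self.mpr (fun d hd => by simp [hk d hd])
      have h3 : k ∉ K' := fun hmem => lt_irrefl k (hk k hmem)
      simp [h1, h2, h3]
    · have h1 : K'.filter (fun d => decide (d < c)) = [] :=
        List.filter_eq_nil_iff.mpr (fun d hd => by simp [not_lt.mpr (h.trans (hk d hd)).le])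
      have h2 : K'.filter (fun d => decide (c < d)) = K' :=
        List.filter_eq_self.mpr (fun d hd => by simp [h.trans (hk d hd)])
      have h3 : c ∉ k :: K' := by
        intro hmem
        rcases List.mem_cons.mp hmem with rfl | hmem
        · exact lt_irrefl c h
        · exact lt_irrefl c (h.trans (hk c hmem))
      simp [h1, h2, h3, not_lt.mpr h.le, h]

def pvKeys (zs : List (Char × Int)) : List Char :=
  PySem.List.sorted (PySem.Set.ofList (zs.map (·.1))) (fun c => c) false

def pvBlock (zs : List (Char × Int)) (c : Char) : List (Char × Int) :=
  zs.filter (fun z => z.1 == c)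

theorem pvKeys_pairwise (zs : List (Char × Int)) : (pvKeys zs).Pairwise (· < ·) :=
  PySem.List.sorted_ofList_pairwise_lt _

theorem mem_pvKeys (zs : List (Char × Int)) (c : Char) : c ∈ pvKeys zs ↔ c ∈ zs.map (·.1) := by
  rw [pvKeys, PySem.List.mem_sorted, PySem.Set.mem_ofList]

theorem pvBlock_eq_nil_of_not_mem (zs : List (Char × Int)) (c : Char)
    (h : c ∉ zs.map (·.1)) : pvBlock zs c = [] := by
  refine List.filter_eq_nil_iff.mpr (fun z hz => ?_)
  simp only [beq_iff_eq]
  intro hzc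
  exact h (List.mem_map.mpr ⟨z, hz, hzc⟩)

theorem pvKeys_append (zs : List (Char × Int)) (z : Char × Int) :
    pvKeys (zs ++ [z]) = (pvKeys zs).filter (fun d => decide (d < z.1)) ++
      z.1 :: (pvKeys zs).filter (fun d => decide (z.1 < d)) := by
  have hp := pvKeys_pairwise zs
  have hsplit := sorted_lt_split (pvKeys zs) z.1 hp
  have hmap : (zs ++ [z]).map (·.1) = zs.map (·.1) ++ [z.1] := by simp
  by_cases hm : z.1 ∈ PySem.Set.ofList (zs.map (·.1))
  · have hc : PySem.Set.contains (PySem.Set.ofList (zs.map (·.1))) z.1 = true := by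
      simpa [PySem.Set.contains] using hm
    have : pvKeys (zs ++ [z]) = pvKeys zs := by
      rw [pvKeys, hmap, PySem.Set.ofList_append_singleton, PySem.Set.add]
      rw [if_pos hc]
      rfl
    rw [this]
    have hmk : z.1 ∈ pvKeys zs := by
      rw [pvKeys, PySem.List.mem_sorted]
      exact hm
    conv_lhs => rw [hsplit]
    simp [hmk]
  · have hc : PySem.Set.contains (PySem.Set.ofList (zs.map (·.1))) z.1 = false := by
      simpa [PySem.Set.contains] using hm
    have hmk : z.1 ∉ pvKeys zs := by
      rw [pvKeys, PySem.List.mem_sorted]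
      exact hm
    have hKlKr : (pvKeys zs).filter (fun d => decide (d < z.1)) ++
        (pvKeys zs).filter (fun d => decide (z.1 < d)) = pvKeys zs := by
      conv_rhs => rw [hsplit]
      simp [hmk]
    rw [pvKeys, hmap, PySem.Set.ofList_append_singleton, PySem.Set.add]
    simp only [hc, Bool.false_eq_true, if_false]
    refine PySem.List.sorted_eq_of_perm_of_pairwise_lt _ _ _ ?_ ?_
    · refine (List.perm_middle).trans ?_
      rw [hKlKr]
      exact ((PySem.List.sorted_perm _ _ _).cons _).trans (List.perm_append_singleton _ _).symm
    · rw [List.pairwise_append]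
      refine ⟨hp.sublist List.filter_sublist, ?_, ?_⟩
      · rw [List.pairwise_cons]
        refine ⟨fun y hy => by simpa using List.of_mem_filter hy,
          hp.sublist List.filter_sublist⟩
      · intro x hx y hy
        have hx' : x < z.1 := by simpa using List.of_mem_filter hx
        rcases List.mem_cons.mp hy with rfl | hy
        · exact hx'
        · exact hx'.trans (by simpa using List.of_mem_filter hy)

-- the stability characterisation of Python's stable sort by first component
theorem sorted_eq_flatMap_blocks (zs : List (Char × Int)) :
    PySem.List.sorted zs (fun q => q.1) false = (pvKeys zs).flatMap (pvBlock zs) := by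
  induction zs using List.reverseRecOn with
  | nil => simp [PySem.List.sorted, pvKeys, PySem.Set.ofList]
  | append_singleton zs z ih =>
    have hp := pvKeys_pairwise zs
    have hsplit := sorted_lt_split (pvKeys zs) z.1 hp
    have hnew := pvKeys_append zs z
    have hstep : PySem.List.sorted (zs ++ [z]) (fun q => q.1) false
        = PySem.List.insertBy (fun a b => decide (a.1 < b.1)) z
            (PySem.List.sorted zs (fun q => q.1) false) := by
      rw [PySem.List.sorted_eq_foldl_insertBy, PySem.List.sorted_eq_foldl_insertBy,
        List.foldl_append]
      rfl
    have hmid : (if z.1 ∈ pvKeys zs then [z.1] else []).flatMap (pvBlock zs) = pvBlock zs z.1 := by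
      by_cases h : z.1 ∈ pvKeys zs
      · simp [h]
      · simp [h]
        exact pvBlock_eq_nil_of_not_mem zs z.1 (fun hm => h ((mem_pvKeys zs z.1).mpr hm))
    have hA : ∀ y ∈ (((pvKeys zs).filter (fun d => decide (d < z.1))).flatMap (pvBlock zs) ++ pvBlock zs z.1),
        (fun a b => decide ((a : Char × Int).1 < b.1)) z y = false := by
      intro y hy
      rcases List.mem_append.mp hy with hy | hy
      · rcases List.mem_flatMap.mp hy with ⟨d, hd, hyd⟩
        have hd' : d < z.1 := by simpa using List.of_mem_filter hd
        have hyk : y.1 = d := by simpa using (List.mem_filter.mp hyd).2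
        simp [hyk, not_lt.mpr hd'.le]
      · have hyk : y.1 = z.1 := by simpa using (List.mem_filter.mp hy).2
        simp [hyk]
    have hB : ∀ y ∈ ((pvKeys zs).filter (fun d => decide (z.1 < d))).flatMap (pvBlock zs),
        (fun a b => decide ((a : Char × Int).1 < b.1)) z y = true := by
      intro y hy
      rcases List.mem_flatMap.mp hy with ⟨d, hd, hyd⟩
      have hd' : z.1 < d := by simpa using List.of_mem_filter hd
      have hyk : y.1 = d := by simpa using (List.mem_filter.mp hyd).2
      simp [hyk, hd']
    rw [hstep, ih]
    conv_lhs => rw [hsplit]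
    rw [List.flatMap_append, List.flatMap_append, hmid]
    rw [insertBy_mid _ _ _ _ hA hB]
    rw [hnew]
    have hbl : ∀ c', pvBlock (zs ++ [z]) c' = pvBlock zs c' ++ (if z.1 = c' then [z] else []) := by
      intro c'
      simp [pvBlock, List.filter_append, List.filter_singleton, beq_iff_eq]
    rw [List.flatMap_append, List.flatMap_cons]
    have hKl : ((pvKeys zs).filter (fun d => decide (d < z.1))).flatMap (pvBlock (zs ++ [z]))
        = ((pvKeys zs).filter (fun d => decide (d < z.1))).flatMap (pvBlock zs) := by
      refine List.flatMap_congr (fun d hd => ?_)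
      have hd' : d < z.1 := by simpa using List.of_mem_filter hd
      rw [hbl d]
      simp [ne_of_gt hd']
    have hKr : ((pvKeys zs).filter (fun d => decide (z.1 < d))).flatMap (pvBlock (zs ++ [z]))
        = ((pvKeys zs).filter (fun d => decide (z.1 < d))).flatMap (pvBlock zs) := by
      refine List.flatMap_congr (fun d hd => ?_)
      have hd' : z.1 < d := by simpa using List.of_mem_filter hd
      rw [hbl d]
      simp [ne_of_lt hd']
    rw [hKl, hKr, hbl z.1]
    simp

theorem pvRuns_block (ws : List (Char × Int)) (p : Char) (h : ∀ w ∈ ws, w.1 = p) :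
    ∀ gs cur, ws.foldl pvRunsStep (gs, some (p, cur)) = (gs, some (p, cur ++ ws.map (·.2))) := by
  induction ws with
  | nil => intro gs cur; simp
  | cons w ws ih =>
    intro gs cur
    have hw : w.1 = p := h w (by simp)
    simp only [List.foldl_cons, pvRunsStep, hw]
    rw [if_pos trivial]
    rw [ih (fun w hw => h w (by simp [hw])) gs (cur ++ [w.2])]
    simp

theorem pvRuns_go (K : List Char) (G : Char → List (Char × Int))
    (hp : K.Pairwise (· ≠ ·)) (hne : ∀ c ∈ K, G c ≠ [])
    (hk : ∀ c ∈ K, ∀ w ∈ G c, w.1 = c) :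
    ∀ gs p cur, (∀ c ∈ K, c ≠ p) →
      pvRunsFlush ((K.flatMap G).foldl pvRunsStep (gs, some (p, cur)))
        = gs ++ cur :: K.map (fun c => (G c).map (·.2)) := by
  induction K with
  | nil => intro gs p cur _; simp [pvRunsFlush]
  | cons c K' ih =>
    intro gs p cur hnp
    rcases List.pairwise_cons.mp hp with ⟨hcK, hp'⟩
    obtain ⟨w, ws, hGc⟩ : ∃ w ws, G c = w :: ws := by
      cases hGcases : G c with
      | nil => exact absurd hGcases (hne c (by simp))
      | cons w ws => exact ⟨w, ws, rfl⟩
    have hw : w.1 = c := hk c (by simp) w (by simp [hGc])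
    have hws : ∀ x ∈ ws, x.1 = w.1 := fun x hx => by
      rw [hw]; exact hk c (by simp) x (by simp [hGc, hx])
    simp only [List.flatMap_cons, List.foldl_append, hGc, List.foldl_cons]
    have hstep1 : pvRunsStep (gs, some (p, cur)) w = (gs ++ [cur], some (w.1, [w.2])) := by
      simp only [pvRunsStep]
      rw [if_neg (by rw [hw]; exact (hnp c (by simp))), ]
    rw [hstep1, pvRuns_block ws w.1 hws]
    rw [ih hp' (fun d hd => hne d (by simp [hd])) (fun d hd => hk d (by simp [hd]))
      (gs ++ [cur]) w.1 ([w.2] ++ ws.map (·.2)) (fun d hd => by rw [hw]; exact (hcK d hd).symm)]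
    simp [hGc]

theorem pvRuns_flatMap (K : List Char) (G : Char → List (Char × Int))
    (hp : K.Pairwise (· ≠ ·)) (hne : ∀ c ∈ K, G c ≠ [])
    (hk : ∀ c ∈ K, ∀ w ∈ G c, w.1 = c) :
    pvRuns (K.flatMap G) = K.map (fun c => (G c).map (·.2)) := by
  cases K with
  | nil => rfl
  | cons c K' =>
    rcases List.pairwise_cons.mp hp with ⟨hcK, hp'⟩
    obtain ⟨w, ws, hGc⟩ : ∃ w ws, G c = w :: ws := by
      cases hGcases : G c with
      | nil => exact absurd hGcases (hne c (by simp))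
      | cons w ws => exact ⟨w, ws, rfl⟩
    have hw : w.1 = c := hk c (by simp) w (by simp [hGc])
    have hws : ∀ x ∈ ws, x.1 = w.1 := fun x hx => by
      rw [hw]; exact hk c (by simp) x (by simp [hGc, hx])
    rw [pvRuns]
    simp only [List.flatMap_cons, List.foldl_append, hGc, List.foldl_cons]
    have hstep1 : pvRunsStep ([], none) w = ([], some (w.1, [w.2])) := by
      simp [pvRunsStep]
    rw [hstep1, pvRuns_block ws w.1 hws]
    rw [pvRuns_go K' G hp' (fun d hd => hne d (by simp [hd])) (fun d hd => hk d (by simp [hd]))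
      [] w.1 ([w.2] ++ ws.map (·.2)) (fun d hd => by rw [hw]; exact (hcK d hd).symm)]
    simp [hGc]

def pvFold (zs : List (Char × Int)) : PySem.Dict Char (List Int) :=
  zs.foldl (fun d z => d.modify z.1 [] (fun l => l ++ [z.2])) PySem.Dict.empty

theorem pvFold_keys (zs : List (Char × Int)) :
    (pvFold zs).keys = PySem.Set.ofList (zs.map (·.1)) := by
  induction zs using List.reverseRecOn with
  | nil => simp [pvFold, PySem.Dict.keys_empty, PySem.Set.ofList]
  | append_singleton zs z ih =>
    have hfold : pvFold (zs ++ [z]) = (pvFold zs).modify z.1 [] (fun l => l ++ [z.2]) := by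
      simp [pvFold]
    rw [hfold, PySem.Dict.keys_modify]
    have hmap : (zs ++ [z]).map (·.1) = zs.map (·.1) ++ [z.1] := by simp
    rw [hmap, PySem.Set.ofList_append_singleton, PySem.Set.add]
    by_cases hm : z.1 ∈ PySem.Set.ofList (zs.map (·.1))
    · have hc : (pvFold zs).contains z.1 = true := by
        rw [PySem.Dict.contains_iff_mem_keys, ih]; exact hm
      rw [PySem.Dict.keys_insert_of_contains _ _ hc, ih, if_pos (by simpa using hm)]
    · have hc : (pvFold zs).contains z.1 = false := by
        rw [Bool.eq_false_iff]
        intro hcon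
        exact hm (ih ▸ (PySem.Dict.contains_iff_mem_keys _ _).mp hcon)
      rw [PySem.Dict.keys_insert_of_not_contains _ _ hc, ih,
        if_neg (by simpa using hm)]

theorem pvFold_items (zs : List (Char × Int)) :
    (pvFold zs).items = (PySem.Set.ofList (zs.map (·.1))).map
      (fun c => (c, (pvBlock zs c).map (·.2))) := by
  have hnd : (pvFold zs).keys.Nodup := by
    rw [pvFold_keys]; exact PySem.Set.nodup_ofList _
  rw [PySem.Dict.items_eq_map_keys _ hnd ([] : List Int), pvFold_keys]
  refine List.map_congr_left (fun c hc => ?_)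
  have := PySem.Dict.getD_foldl_modify_append zs PySem.Dict.empty c
  rw [pvFold]
  rw [this]
  simp [pvBlock]

theorem pvSorted_items (zs : List (Char × Int)) :
    PySem.List.sorted ((pvFold zs).items) (fun kv => kv.1) false
      = (pvKeys zs).map (fun c => (c, (pvBlock zs c).map (·.2))) := by
  rw [pvFold_items]
  refine PySem.List.sorted_eq_of_perm_of_pairwise_lt _ _ _ ?_ ?_
  · exact (PySem.List.sorted_perm _ _ _).map _
  · exact List.Pairwise.map _ (fun a b h => h) (pvKeys_pairwise zs)

theorem enumerate_map {α β : Type} (f : α → β) (xs : List α) :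
    ∀ s : Int, PySem.List.enumerate (xs.map f) s
      = (PySem.List.enumerate xs s).map (fun p => (p.1, f p.2)) := by
  induction xs with
  | nil => intro s; simp [PySem.List.enumerate]
  | cons x xs ih =>
    intro s
    rw [List.map_cons, PySem.List.enumerate_cons, PySem.List.enumerate_cons, ih (s + 1),
      List.map_cons]

theorem pvLevels_eq (zs : List (Char × Int)) :
    (PySem.List.enumerate (PySem.List.sorted
        ((zs.foldl (fun d z => d.modify z.1 [] (fun l => l ++ [z.2])) PySem.Dict.empty).items)
        (fun kv => kv.1) false) 0).map (fun ip => (ip.1, ip.2.2))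
      = (PySem.List.enumerate (pvRuns (PySem.List.sorted zs (fun q => q.1) false)) 0).map
          (fun ig => (ig.1, ig.2)) := by
  have hlhs : PySem.List.sorted ((zs.foldl (fun d z => d.modify z.1 [] (fun l => l ++ [z.2]))
      PySem.Dict.empty).items) (fun kv => kv.1) false
      = (pvKeys zs).map (fun c => (c, (pvBlock zs c).map (·.2))) := pvSorted_items zs
  have hp : (pvKeys zs).Pairwise (· ≠ ·) :=
    (pvKeys_pairwise zs).imp (fun h => ne_of_lt h)
  have hne : ∀ c ∈ pvKeys zs, pvBlock zs c ≠ [] := by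
    intro c hc
    rcases List.mem_map.mp ((mem_pvKeys zs c).mp hc) with ⟨z, hz, hzc⟩
    exact List.ne_nil_of_mem (List.mem_filter.mpr ⟨hz, by simp [hzc]⟩)
  have hk : ∀ c ∈ pvKeys zs, ∀ w ∈ pvBlock zs c, w.1 = c := by
    intro c _ w hw
    simpa using (List.mem_filter.mp hw).2
  rw [hlhs, sorted_eq_flatMap_blocks, pvRuns_flatMap _ _ hp hne hk,
    enumerate_map, enumerate_map]
  simp [List.map_map, Function.comp]


-- ===== VERDICT (by name: the statement is the Claim_ definition above) =====
theorem build_spec : Claim_equal_build := by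
  unfold Claim_equal_build
  intro entities _
  unfold Spec_build
  have e1 := pvLevels_eq (entities.map (fun p => (pvFirstKey p.2, p.1)))
  simp only [List.foldl_map, Prod.mk.eta, List.map_id'] at e1
  have e2 := pvLevels_eq ((PySem.List.enumerate (pvRuns (PySem.List.sorted
      (entities.map (fun p => (pvFirstKey p.2, p.1))) (fun q => q.1) false)) 0).map
      (fun cm => (pvSecondKeyOf entities cm.2, cm.1)))
  simp only [List.foldl_map, Prod.mk.eta, List.map_id'] at e2
  simp only [build, build_alt, Prod.mk.eta, List.map_id']
  rw [e1, e2]
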